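-- pv_equiv track=rewrite | github.com/pi-3-14159265/AoPS_Math | numTheroy.py | reverse_crt
-- ===== SOURCE A (Python) =====
-- import math
--
-- def reverse_crt(n):
--     """
--     collects order pair (p,q) such that n=pq such that gcd(p,q)=1
--
--     Args:
--         n: the argument
--
--     Returns:
--         a list of tuples of order pairs (p,q) such that n=pq and gcd(p,q)=1 not including (1,n) or (p,q) and (q,p)
--
--     """
--
--     pairs = []
--     for p in range(2, n):
--         if n % p == 0:
--             q = n // p
--             if math.gcd(p, q) == 1:
--                 pairs.append((p, q))
--     for pair in pairs:
--         if pair[::-1] in pairs: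
--             pairs.remove(pair[::-1])
--     return pairs
-- ===== SOURCE B (Python) =====
-- import math
--
-- def reverse_crt(n):
--     """Coprime ordered factor pairs (p, q), 2 <= p < q, p*q == n, in ascending p.
--
--     Scans divisors only up to sqrt(n) instead of scanning all of range(2, n)
--     and then deduplicating reversed pairs.
--     """
--     pairs = []
--     p = 2
--     while p * p < n:
--         if n % p == 0 and math.gcd(p, n // p) == 1:
--             pairs.append((p, n // p))
--         p += 1
--     return pairs
-- ===== Notes on version B (the rewrite author's own statement) =====
-- stated objective: faster
-- what changed: B enumerates divisors only up to sqrt(n), emitting each coprime pair (p, n//p) with p<q directly in ascending order, instead of A's full scan of range(2,n) followed by a mutating second pass that removes reversed duplicates.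
import Mathlib
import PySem

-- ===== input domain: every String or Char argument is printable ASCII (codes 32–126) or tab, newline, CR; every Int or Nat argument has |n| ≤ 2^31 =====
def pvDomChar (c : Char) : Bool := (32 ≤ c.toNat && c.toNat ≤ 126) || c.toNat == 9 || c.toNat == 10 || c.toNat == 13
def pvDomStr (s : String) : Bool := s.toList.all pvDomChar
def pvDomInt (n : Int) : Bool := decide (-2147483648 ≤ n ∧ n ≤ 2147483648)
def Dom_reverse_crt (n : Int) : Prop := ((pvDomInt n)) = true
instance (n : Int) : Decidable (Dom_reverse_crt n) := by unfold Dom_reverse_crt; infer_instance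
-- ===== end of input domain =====

-- B scans divisors only up to sqrt(n) and emits each coprime pair (p, n//p) directly,
-- instead of A's full scan of range(2, n) followed by a mutating removal of reversed pairs.

-- ===== PORT A =====
-- first loop: `for p in range(2, n): if n % p == 0: q = n//p; if gcd(p,q)==1: pairs.append((p,q))`
-- (fuel = the number of remaining loop iterations (n - p).toNat, a totality guard only)
def pvCollectA : Nat → Int → Int → List (Int × Int)
  | 0, _, _ => []
  | k + 1, n, p =>
    if p < n then
      (if PySem.Int.mod n p = 0 ∧ Int.gcd p (PySem.Int.floordiv n p) = 1
        then [(p, PySem.Int.floordiv n p)] else []) ++ pvCollectA k n (p + 1)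
    else []

-- second loop: `for pair in pairs: if pair[::-1] in pairs: pairs.remove(pair[::-1])`
-- Python's for over the mutating list = index loop; list.remove = PySem.List.remove?
-- (fuel = the initial list length; len - i shrinks every iteration, a totality guard only)
def pvRemoveLoop : Nat → List (Int × Int) → Nat → List (Int × Int)
  | 0, pairs, _ => pairs
  | k + 1, pairs, i =>
    if h : i < pairs.length then
      if ((pairs[i]).2, (pairs[i]).1) ∈ pairs then
        pvRemoveLoop k ((PySem.List.remove? pairs ((pairs[i]).2, (pairs[i]).1)).getD pairs) (i + 1)
      else
        pvRemoveLoop k pairs (i + 1)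
    else pairs

def reverse_crt (n : Int) : List (Int × Int) :=
  pvRemoveLoop (pvCollectA (n - 2).toNat n 2).length (pvCollectA (n - 2).toNat n 2) 0

-- ===== PORT B =====
-- `while p * p < n: if n % p == 0 and gcd(p, n//p) == 1: pairs.append((p, n//p)); p += 1`
-- (fuel = (n - p).toNat bounds the iteration count, a totality guard only)
def pvCollectB : Nat → Int → Int → List (Int × Int)
  | 0, _, _ => []
  | k + 1, n, p =>
    if p * p < n then
      (if PySem.Int.mod n p = 0 ∧ Int.gcd p (PySem.Int.floordiv n p) = 1
        then [(p, PySem.Int.floordiv n p)] else []) ++ pvCollectB k n (p + 1)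
    else []

def reverse_crt_alt (n : Int) : List (Int × Int) := pvCollectB (n - 2).toNat n 2

-- ===== PRECONDITION & SPEC =====
def Spec_reverse_crt (n : Int) (out : List (Int × Int)) : Prop := out = reverse_crt_alt n
instance (n : Int) (out : List (Int × Int)) : Decidable (Spec_reverse_crt n out) := by unfold Spec_reverse_crt; infer_instance

-- ===== CLAIM (what is proved, stated in full; the proofs are below) =====
def Claim_equal_reverse_crt : Prop := ∀ (n : Int), Dom_reverse_crt n → Spec_reverse_crt n (reverse_crt n)

-- ===== LEMMAS AND PROOFS =====

-- membership characterization of B's loop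
theorem pvMemB (n : Int) : ∀ (k : Nat) (p : Int), (n - p).toNat ≤ k → 2 ≤ p → ∀ z : Int × Int,
    (z ∈ pvCollectB k n p ↔
      p ≤ z.1 ∧ z.1 * z.1 < n ∧ n % z.1 = 0 ∧ Int.gcd z.1 (n / z.1) = 1 ∧ z.2 = n / z.1) := by
  intro k
  induction k with
  | zero =>
    intro p hk hp z
    rw [pvCollectB]
    simp only [List.not_mem_nil, false_iff]
    rintro ⟨h1, h2, -⟩
    have hnp : n ≤ p := by omega
    nlinarith
  | succ k ih =>
    intro p hk hp z
    by_cases hstop : p * p < n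
    · have hpn : p < n := by nlinarith
      rw [pvCollectB, if_pos hstop]
      rw [PySem.Int.mod_eq_emod_of_pos (by omega : (0:Int) < p),
          PySem.Int.floordiv_eq_ediv_of_pos (by omega : (0:Int) < p)]
      rw [List.mem_append, ih (p + 1) (by omega) (by omega) z]
      constructor
      · rintro (hl | hr)
        · by_cases hc : n % p = 0 ∧ Int.gcd p (n / p) = 1
          · rw [if_pos hc, List.mem_singleton] at hl
            rw [hl]
            exact ⟨le_refl p, hstop, hc.1, hc.2, rfl⟩
          · rw [if_neg hc] at hl
            exact absurd hl (List.not_mem_nil)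
        · exact ⟨by omega, hr.2.1, hr.2.2.1, hr.2.2.2.1, hr.2.2.2.2⟩
      · rintro ⟨h1, h2, h3, h4, h5⟩
        by_cases hzp : z.1 = p
        · left
          rw [if_pos ⟨by rw [← hzp]; exact h3, by rw [← hzp]; exact h4⟩, List.mem_singleton]
          exact Prod.ext_iff.mpr ⟨hzp, by rw [h5, hzp]⟩
        · right
          exact ⟨by omega, h2, h3, h4, h5⟩
    · rw [pvCollectB, if_neg hstop]
      simp only [List.not_mem_nil, false_iff]
      rintro ⟨h1, h2, -⟩
      have := mul_le_mul hp hp (by omega : (0:Int) ≤ 2) (by omega : (0:Int) ≤ p)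
      nlinarith

-- membership characterization of A's first loop
theorem pvMemA (n : Int) : ∀ (k : Nat) (p : Int), (n - p).toNat ≤ k → 2 ≤ p → ∀ z : Int × Int,
    (z ∈ pvCollectA k n p ↔
      p ≤ z.1 ∧ z.1 < n ∧ n % z.1 = 0 ∧ Int.gcd z.1 (n / z.1) = 1 ∧ z.2 = n / z.1) := by
  intro k
  induction k with
  | zero =>
    intro p hk hp z
    rw [pvCollectA]
    simp only [List.not_mem_nil, false_iff]
    rintro ⟨h1, h2, -⟩
    omega
  | succ k ih =>
    intro p hk hp z
    by_cases hstop : p < n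
    · rw [pvCollectA, if_pos hstop]
      rw [PySem.Int.mod_eq_emod_of_pos (by omega : (0:Int) < p),
          PySem.Int.floordiv_eq_ediv_of_pos (by omega : (0:Int) < p)]
      rw [List.mem_append, ih (p + 1) (by omega) (by omega) z]
      constructor
      · rintro (hl | hr)
        · by_cases hc : n % p = 0 ∧ Int.gcd p (n / p) = 1
          · rw [if_pos hc, List.mem_singleton] at hl
            rw [hl]
            exact ⟨le_refl p, hstop, hc.1, hc.2, rfl⟩
          · rw [if_neg hc] at hl
            exact absurd hl (List.not_mem_nil)
        · exact ⟨by omega, hr.2.1, hr.2.2.1, hr.2.2.2.1, hr.2.2.2.2⟩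
      · rintro ⟨h1, h2, h3, h4, h5⟩
        by_cases hzp : z.1 = p
        · left
          rw [if_pos ⟨by rw [← hzp]; exact h3, by rw [← hzp]; exact h4⟩, List.mem_singleton]
          exact Prod.ext_iff.mpr ⟨hzp, by rw [h5, hzp]⟩
        · right
          exact ⟨by omega, h2, h3, h4, h5⟩
    · rw [pvCollectA, if_neg hstop]
      simp only [List.not_mem_nil, false_iff]
      rintro ⟨h1, h2, -⟩
      omega

-- core facts about an element of B's list
theorem pvFactsB (n : Int) (z : Int × Int) (hz : z ∈ pvCollectB (n - 2).toNat n 2) :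
    2 ≤ z.1 ∧ z.1 * z.1 < n ∧ n = z.1 * z.2 ∧ z.1 < z.2 := by
  obtain ⟨h1, h2, h3, h4, h5⟩ := (pvMemB n (n - 2).toNat 2 le_rfl le_rfl z).mp hz
  have hdvd : z.1 ∣ n := Int.dvd_of_emod_eq_zero h3
  have hmul : n = z.1 * z.2 := by
    rw [h5, mul_comm]
    exact (Int.ediv_mul_cancel hdvd).symm
  refine ⟨h1, h2, hmul, by nlinarith⟩

-- the arithmetic heart: membership in A's list splits into a low pair or a swapped low pair
theorem pvMemIff (n : Int) (z : Int × Int) :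
    z ∈ pvCollectA (n - 2).toNat n 2 ↔
      (z ∈ pvCollectB (n - 2).toNat n 2 ∨ Prod.swap z ∈ pvCollectB (n - 2).toNat n 2) := by
  rw [pvMemA n (n - 2).toNat 2 le_rfl le_rfl z,
      pvMemB n (n - 2).toNat 2 le_rfl le_rfl z,
      pvMemB n (n - 2).toNat 2 le_rfl le_rfl z.swap]
  simp only [Prod.fst_swap, Prod.snd_swap]
  constructor
  · rintro ⟨h1, h2, h3, h4, h5⟩
    have hdvd : z.1 ∣ n := Int.dvd_of_emod_eq_zero h3
    have hmul : n = z.1 * z.2 := by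
      rw [h5, mul_comm]
      exact (Int.ediv_mul_cancel hdvd).symm
    have hnpos : (0:Int) < n := by omega
    have hbpos : (0:Int) < z.2 := by nlinarith
    have hgab : Int.gcd z.1 z.2 = 1 := by rw [h5]; exact h4
    have hne : z.1 ≠ z.2 := by
      intro he
      rw [← he, Int.gcd_self] at hgab
      omega
    rcases lt_or_gt_of_ne hne with hlt | hgt
    · exact Or.inl ⟨h1, by nlinarith, h3, h4, h5⟩
    · have hb1 : z.2 ≠ 1 := by
        intro he
        rw [he, mul_one] at hmul
        omega
      have hb2 : 2 ≤ z.2 := by omega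
      have hdvdb : z.2 ∣ n := ⟨z.1, by rw [hmul, mul_comm]⟩
      have hnb : n / z.2 = z.1 := by
        rw [hmul, mul_comm z.1 z.2]
        exact Int.mul_ediv_cancel_left z.1 (by omega)
      refine Or.inr ⟨hb2, by nlinarith, Int.emod_eq_zero_of_dvd hdvdb, ?_, hnb.symm⟩
      rw [hnb, Int.gcd_comm]
      exact hgab
  · rintro (⟨h1, h2, h3, h4, h5⟩ | ⟨h1, h2, h3, h4, h5⟩)
    · exact ⟨h1, by nlinarith, h3, h4, h5⟩
    · have hdvd : z.2 ∣ n := Int.dvd_of_emod_eq_zero h3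
      have hmul : n = z.2 * z.1 := by
        rw [h5, mul_comm]
        exact (Int.ediv_mul_cancel hdvd).symm
      have hba : z.2 < z.1 := by nlinarith
      have hdvda : z.1 ∣ n := ⟨z.2, by rw [hmul, mul_comm]⟩
      have hna : n / z.1 = z.2 := by
        rw [hmul, mul_comm z.2 z.1]
        exact Int.mul_ediv_cancel_left z.2 (by omega)
      refine ⟨by omega, by nlinarith, Int.emod_eq_zero_of_dvd hdvda, ?_, hna.symm⟩
      rw [hna, Int.gcd_comm, h5]
      exact h4

-- sortedness (strictly increasing first components) of B's loop output
theorem pvSortedB (n : Int) : ∀ (k : Nat) (p : Int), (n - p).toNat ≤ k → 2 ≤ p →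
    (pvCollectB k n p).Pairwise (fun x y => x.1 < y.1) := by
  intro k
  induction k with
  | zero =>
    intro p hk hp
    rw [pvCollectB]
    exact List.Pairwise.nil
  | succ k ih =>
    intro p hk hp
    by_cases hstop : p * p < n
    · have hpn : p < n := by nlinarith
      rw [pvCollectB, if_pos hstop]
      have htail := ih (p + 1) (by omega) (by omega)
      have hmem : ∀ y ∈ pvCollectB k n (p + 1), p < y.1 := by
        intro y hy
        have := ((pvMemB n k (p + 1) (by omega) (by omega) y).mp hy).1
        omega
      by_cases hc : PySem.Int.mod n p = 0 ∧ Int.gcd p (PySem.Int.floordiv n p) = 1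
      · rw [if_pos hc, List.singleton_append, List.pairwise_cons]
        exact ⟨fun y hy => hmem y hy, htail⟩
      · rw [if_neg hc, List.nil_append]
        exact htail
    · rw [pvCollectB, if_neg hstop]
      exact List.Pairwise.nil

-- sortedness of A's first loop output
theorem pvSortedA (n : Int) : ∀ (k : Nat) (p : Int), (n - p).toNat ≤ k → 2 ≤ p →
    (pvCollectA k n p).Pairwise (fun x y => x.1 < y.1) := by
  intro k
  induction k with
  | zero =>
    intro p hk hp
    rw [pvCollectA]
    exact List.Pairwise.nil
  | succ k ih =>
    intro p hk hp
    by_cases hstop : p < n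
    · rw [pvCollectA, if_pos hstop]
      have htail := ih (p + 1) (by omega) (by omega)
      have hmem : ∀ y ∈ pvCollectA k n (p + 1), p < y.1 := by
        intro y hy
        have := ((pvMemA n k (p + 1) (by omega) (by omega) y).mp hy).1
        omega
      by_cases hc : PySem.Int.mod n p = 0 ∧ Int.gcd p (PySem.Int.floordiv n p) = 1
      · rw [if_pos hc, List.singleton_append, List.pairwise_cons]
        exact ⟨fun y hy => hmem y hy, htail⟩
      · rw [if_neg hc, List.nil_append]
        exact htail
    · rw [pvCollectA, if_neg hstop]
      exact List.Pairwise.nil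

-- A's first loop = B's list followed by the reversed swapped B list
theorem pvSplit (n : Int) :
    pvCollectA (n - 2).toNat n 2 =
      pvCollectB (n - 2).toNat n 2 ++ ((pvCollectB (n - 2).toNat n 2).map Prod.swap).reverse := by
  have hsortA := pvSortedA n (n - 2).toNat 2 le_rfl le_rfl
  have hsortB := pvSortedB n (n - 2).toNat 2 le_rfl le_rfl
  have hmemrev : ∀ z : Int × Int,
      z ∈ ((pvCollectB (n - 2).toNat n 2).map Prod.swap).reverse ↔
        Prod.swap z ∈ pvCollectB (n - 2).toNat n 2 := by
    intro z
    rw [List.mem_reverse, List.mem_map]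
    constructor
    · rintro ⟨y, hy, rfl⟩
      simpa using hy
    · intro h
      exact ⟨Prod.swap z, h, Prod.swap_swap z⟩
  have hsortR : (pvCollectB (n - 2).toNat n 2 ++
      ((pvCollectB (n - 2).toNat n 2).map Prod.swap).reverse).Pairwise
      (fun x y : Int × Int => x.1 < y.1) := by
    rw [List.pairwise_append]
    refine ⟨hsortB, ?_, ?_⟩
    · rw [List.pairwise_reverse, List.pairwise_map]
      refine hsortB.imp_of_mem ?_
      intro a b ha hb hab
      obtain ⟨ha1, ha2, ha3, ha4⟩ := pvFactsB n a ha
      obtain ⟨hb1, hb2, hb3, hb4⟩ := pvFactsB n b hb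
      simp only [Prod.fst_swap]
      nlinarith
    · intro a ha b hb
      rw [hmemrev b] at hb
      obtain ⟨ha1, ha2, ha3, ha4⟩ := pvFactsB n a ha
      obtain ⟨hb1, hb2, hb3, hb4⟩ := pvFactsB n (Prod.swap b) hb
      simp only [Prod.fst_swap, Prod.snd_swap] at hb1 hb2 hb3 hb4
      nlinarith
  have hndA : (pvCollectA (n - 2).toNat n 2).Nodup :=
    hsortA.imp (fun hab => fun he => absurd (he ▸ hab) (lt_irrefl _))
  have hndR : (pvCollectB (n - 2).toNat n 2 ++
      ((pvCollectB (n - 2).toNat n 2).map Prod.swap).reverse).Nodup :=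
    hsortR.imp (fun hab => fun he => absurd (he ▸ hab) (lt_irrefl _))
  refine List.Perm.eq_of_pairwise
    (fun a b _ _ h h' => absurd (lt_trans h h') (lt_irrefl _)) hsortA hsortR ?_
  refine (List.perm_ext_iff_of_nodup hndA hndR).mpr ?_
  intro z
  rw [List.mem_append, hmemrev z, pvMemIff n z]

-- the invariant of A's second (mutating removal) loop
theorem pvRemoveLoop_eq (xs : List (Int × Int)) (hlt : ∀ x ∈ xs, x.1 < x.2) (hnd : xs.Nodup) :
    ∀ (k i : Nat), xs.length - i ≤ k →
      pvRemoveLoop k (xs ++ ((xs.drop i).map Prod.swap).reverse) i = xs := by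
  intro k
  induction k with
  | zero =>
    intro i hk
    have hge : xs.length ≤ i := by omega
    rw [List.drop_eq_nil_of_le hge]
    simp only [List.map_nil, List.reverse_nil, List.append_nil]
    rw [pvRemoveLoop]
  | succ k ih =>
    intro i hk
    by_cases hi : i < xs.length
    · have hdropc : xs.drop i = xs[i] :: xs.drop (i + 1) := List.drop_eq_getElem_cons hi
      have hilen : i < (xs ++ ((xs.drop i).map Prod.swap).reverse).length := by
        rw [List.length_append]
        omega
      have hget : (xs ++ ((xs.drop i).map Prod.swap).reverse)[i] = xs[i] :=
        List.getElem_append_left hi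
      have hswapmem : Prod.swap xs[i] ∈ (xs ++ ((xs.drop i).map Prod.swap).reverse) := by
        rw [List.mem_append, List.mem_reverse, List.mem_map]
        exact Or.inr ⟨xs[i], by rw [hdropc]; exact List.mem_cons_self, rfl⟩
      have hswapval : ((xs ++ ((xs.drop i).map Prod.swap).reverse)[i].2,
          (xs ++ ((xs.drop i).map Prod.swap).reverse)[i].1) = Prod.swap xs[i] := by
        rw [hget]
        rfl
      rw [pvRemoveLoop, dif_pos hilen]
      rw [hswapval] at *
      rw [if_pos hswapmem]
      rw [PySem.List.remove?_eq_some_erase _ _ hswapmem, Option.getD_some]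
      have hnotxs : Prod.swap xs[i] ∉ xs := by
        intro hmem
        have h1 := hlt _ hmem
        have h2 := hlt _ (xs.getElem_mem hi)
        simp only [Prod.fst_swap, Prod.snd_swap] at h1
        omega
      rw [List.erase_append_right _ hnotxs]
      have hndd : (xs.drop i).Nodup := hnd.sublist (List.drop_sublist i xs)
      rw [hdropc] at hndd
      have hpre : Prod.swap xs[i] ∉ ((xs.drop (i + 1)).map Prod.swap).reverse := by
        rw [List.mem_reverse, List.mem_map]
        rintro ⟨y, hy, hsy⟩
        have : y = xs[i] := by
          have := congrArg Prod.swap hsy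
          simpa using this
        rw [this] at hy
        exact (List.nodup_cons.mp hndd).1 hy
      rw [hdropc, List.map_cons, List.reverse_cons, List.erase_append_right _ hpre,
          List.erase_cons_head, List.append_nil]
      exact ih (i + 1) (by omega)
    · have hge : xs.length ≤ i := by omega
      rw [List.drop_eq_nil_of_le hge]
      simp only [List.map_nil, List.reverse_nil, List.append_nil]
      rw [pvRemoveLoop, dif_neg (by omega)]

-- ===== VERDICT (by name: the statement is the Claim_ definition above) =====
theorem reverse_crt_spec : Claim_equal_reverse_crt := by
  intro n _hdom
  show reverse_crt n = reverse_crt_alt n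
  unfold reverse_crt reverse_crt_alt
  rw [pvSplit n]
  have hlt : ∀ x ∈ pvCollectB (n - 2).toNat n 2, x.1 < x.2 := fun x hx => (pvFactsB n x hx).2.2.2
  have hnd : (pvCollectB (n - 2).toNat n 2).Nodup :=
    (pvSortedB n (n - 2).toNat 2 le_rfl le_rfl).imp
      (fun hab => fun he => absurd (he ▸ hab) (lt_irrefl _))
  have := pvRemoveLoop_eq (pvCollectB (n - 2).toNat n 2) hlt hnd
    (pvCollectB (n - 2).toNat n 2 ++
      ((pvCollectB (n - 2).toNat n 2).map Prod.swap).reverse).length 0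
    (by rw [List.length_append]; omega)
  simpa using this
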